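-- pv_equiv track=rewrite | github.com/JavierJimenez2/Proyecto | SAR_lib.py | and_posting
-- ===== SOURCE A (Python) =====
-- def and_posting(p1: list, p2: list):
--     """
--     NECESARIO PARA TODAS LAS VERSIONES
--
--     Calcula el AND de dos posting list de forma EFICIENTE
--
--     param:  "p1", "p2": posting lists sobre las que calcular
--
--
--     return: posting list con los artid incluidos en p1 y p2
--
--     """
--     p1 = sorted(p1, reverse=False)
--     p2 = sorted(p2, reverse=False)
--     i = 0
--     j = 0
--     sol = []
--     while i < len(p1) and j < len(p2):
--         if p1[i] == p2[j]:
--             sol.append(p1[i])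
--             i += 1
--             j += 1
--         elif p1[i] < p2[j]:
--             i += 1
--         else:
--             j += 1
--     return sol
-- ===== SOURCE B (Python) =====
-- def and_posting(p1: list, p2: list):
--     c1 = {}
--     for x in p1:
--         c1[x] = c1.get(x, 0) + 1
--     c2 = {}
--     for x in p2:
--         c2[x] = c2.get(x, 0) + 1
--     out = []
--     for k, v in c1.items():
--         out += [k] * min(v, c2.get(k, 0))
--     return sorted(out)
-- ===== Notes on version B (the rewrite author's own statement) =====
-- stated objective: alternative
-- what changed: Replaces sorting both lists and a two-pointer merge with building dict count tables for both lists, taking per-key minimum counts, expanding them, and sorting only the (usually small) intersection.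
import Mathlib
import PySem

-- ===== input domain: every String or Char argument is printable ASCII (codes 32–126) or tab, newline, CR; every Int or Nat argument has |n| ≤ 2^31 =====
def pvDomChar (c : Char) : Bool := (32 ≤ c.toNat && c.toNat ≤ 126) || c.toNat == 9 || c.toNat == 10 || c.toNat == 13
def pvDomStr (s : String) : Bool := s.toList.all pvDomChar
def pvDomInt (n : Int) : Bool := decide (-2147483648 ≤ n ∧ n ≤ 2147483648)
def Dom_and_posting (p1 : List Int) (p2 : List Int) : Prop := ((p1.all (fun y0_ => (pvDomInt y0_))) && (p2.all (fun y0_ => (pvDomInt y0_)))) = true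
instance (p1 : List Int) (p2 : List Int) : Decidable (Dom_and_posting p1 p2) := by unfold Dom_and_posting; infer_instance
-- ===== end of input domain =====

-- B replaces A's sort-both + two-pointer merge with dict-based count tables intersected
-- per key and expanded, then one final sort (objective: alternative; return value only).


-- ===== PORT A =====
-- the while-loop over indices i, j with accumulator sol, as structural recursion on
-- the two (sorted) lists
def mergeLoop : List Int → List Int → List Int → List Int
  | sol, x :: xs, y :: ys =>
      if x = y then mergeLoop (sol ++ [x]) xs ys
      else if x < y then mergeLoop sol xs (y :: ys)
      else mergeLoop sol (x :: xs) ys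
  | sol, _, _ => sol
termination_by _ a b => a.length + b.length

def and_posting (p1 : List Int) (p2 : List Int) : List Int :=
  mergeLoop [] (PySem.List.sorted p1 (fun x => x) false) (PySem.List.sorted p2 (fun x => x) false)

-- ===== PORT B =====
def and_posting_alt (p1 : List Int) (p2 : List Int) : List Int :=
  let c1 := p1.foldl (fun d x => d.insert x (d.getD x 0 + 1)) PySem.Dict.empty
  let c2 := p2.foldl (fun d x => d.insert x (d.getD x 0 + 1)) PySem.Dict.empty
  let out := c1.items.foldl
    (fun acc kv => acc ++ PySem.List.pyRepeat [kv.1] (min kv.2 (c2.getD kv.1 0))) []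
  PySem.List.sorted out (fun x => x) false

-- ===== PRECONDITION & SPEC =====
def Spec_and_posting (p1 : List Int) (p2 : List Int) (out : List Int) : Prop := out = and_posting_alt p1 p2
instance (p1 : List Int) (p2 : List Int) (out : List Int) : Decidable (Spec_and_posting p1 p2 out) := by unfold Spec_and_posting; infer_instance

-- ===== CLAIM (what is proved, stated in full; the proofs are below) =====
def Claim_equal_and_posting : Prop := ∀ (p1 : List Int) (p2 : List Int), Dom_and_posting p1 p2 → Spec_and_posting p1 p2 (and_posting p1 p2)

-- ===== LEMMAS AND PROOFS =====

-- accumulator-free version of A's merge loop, for the proofs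
def mergeInter : List Int → List Int → List Int
  | x :: xs, y :: ys =>
      if x = y then x :: mergeInter xs ys
      else if x < y then mergeInter xs (y :: ys)
      else mergeInter (x :: xs) ys
  | _, _ => []
termination_by a b => a.length + b.length

lemma mergeLoop_eq (sol : List Int) (a b : List Int) :
    mergeLoop sol a b = sol ++ mergeInter a b := by
  induction sol, a, b using mergeLoop.induct with
  | case1 sol x xs ys ih =>
      rw [mergeLoop, mergeInter]; simp [ih]
  | case2 sol x xs y ys hxy hlt ih =>
      rw [mergeLoop, mergeInter]; simp [hxy, hlt, ih]
  | case3 sol x xs y ys hxy hlt ih =>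
      rw [mergeLoop, mergeInter]; simp [hxy, hlt, ih]
  | case4 sol a b h =>
      match a, b with
      | [], _ => rw [mergeLoop.eq_def, mergeInter.eq_def]; simp
      | _ :: _, [] => rw [mergeLoop.eq_def, mergeInter.eq_def]; simp
      | x :: xs, y :: ys => exact ((h x xs y ys) rfl rfl).elim

lemma mergeInter_sublist (a b : List Int) : (mergeInter a b).Sublist a := by
  induction a, b using mergeInter.induct with
  | case1 t1 x t2 ih => rw [mergeInter]; simpa using ih.cons_cons x
  | case2 x xs y ys hxy hlt ih => rw [mergeInter]; simpa [hxy, hlt] using ih.cons x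
  | case3 x xs y ys hxy hlt ih => rw [mergeInter]; simpa [hxy, hlt] using ih
  | case4 a b h => rw [mergeInter.eq_def]
                   match a, b with
                   | [], _ => simp
                   | _ :: _, [] => simp
                   | x :: xs, y :: ys => exact ((h x xs y ys) rfl rfl).elim

lemma count_zero_of_sorted_lt {x y : Int} {ys : List Int}
    (hb : (y :: ys).Pairwise (· ≤ ·)) (hlt : x < y) : (y :: ys).count x = 0 := by
  refine List.count_eq_zero.mpr ?_
  intro hmem
  rcases List.mem_cons.mp hmem with h | h
  · omega
  · have := (List.pairwise_cons.mp hb).1 x h; omega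

lemma mergeInter_count (a b : List Int) :
    a.Pairwise (· ≤ ·) → b.Pairwise (· ≤ ·) → ∀ v : Int,
    (mergeInter a b).count v = min (a.count v) (b.count v) := by
  induction a, b using mergeInter.induct with
  | case1 t1 x t2 ih =>
      intro ha hb v
      rw [mergeInter]; simp only [if_true]
      have := ih (List.pairwise_cons.mp ha).2 (List.pairwise_cons.mp hb).2 v
      by_cases hv : v = x
      · subst hv; simp [this]
      · simp [Ne.symm hv, this]
  | case2 x xs y ys hxy hlt ih =>
      intro ha hb v
      rw [mergeInter]; simp only [hxy, hlt, if_false, if_true]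
      have := ih (List.pairwise_cons.mp ha).2 hb v
      by_cases hv : v = x
      · subst hv
        rw [this, count_zero_of_sorted_lt hb hlt]
        simp
      · rw [this]; simp [List.count_cons, Ne.symm hv]
  | case3 x xs y ys hxy hlt ih =>
      intro ha hb v
      rw [mergeInter]; simp only [hxy, hlt, if_false]
      have := ih ha (List.pairwise_cons.mp hb).2 v
      by_cases hv : v = y
      · subst hv
        have hylt : v < x := by omega
        rw [this, count_zero_of_sorted_lt ha hylt]
        simp
      · rw [this]; simp [List.count_cons, Ne.symm hv]
  | case4 a b h =>
      intro ha hb v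
      rw [mergeInter.eq_def]
      match a, b with
      | [], _ => simp
      | _ :: _, [] => simp
      | x :: xs, y :: ys => exact ((h x xs y ys) rfl rfl).elim

lemma count_flatMap_replicate (l : List Int) (hl : l.Nodup) (f : Int → Nat) (v : Int) :
    (l.flatMap (fun k => List.replicate (f k) k)).count v = if v ∈ l then f v else 0 := by
  induction l with
  | nil => simp
  | cons k t ih =>
      simp only [List.flatMap_cons, List.count_append, List.count_replicate,
        ih hl.of_cons, List.mem_cons]
      by_cases hv : v = k
      · subst hv
        have : v ∉ t := (List.nodup_cons.mp hl).1
        simp [this]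
      · simp [hv, Ne.symm hv]

lemma alt_count (p1 p2 : List Int) (v : Int) :
    (and_posting_alt p1 p2).count v = min (p1.count v) (p2.count v) := by
  unfold and_posting_alt
  simp only [PySem.Dict.foldl_insert_getD_add_one_eq_counter,
    PySem.List.foldl_append_eq_flatMap, List.nil_append]
  rw [(PySem.List.sorted_perm _ _ _).count_eq]
  rw [PySem.Dict.items_counter, List.flatMap_map]
  have hrw : (fun k => (PySem.List.pyRepeat [k] (min ((List.count k p1 : Int))
      ((PySem.Dict.counter p2).getD k 0)))) =
      fun k => List.replicate (min (p1.count k) (p2.count k)) k := by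
    funext k
    rw [PySem.Dict.getD_counter, PySem.List.pyRepeat_singleton]
    congr 1
    omega
  simp only [hrw]
  rw [count_flatMap_replicate _ (PySem.Set.nodup_ofList p1) _ v]
  by_cases hv : v ∈ p1
  · simp [PySem.Set.mem_ofList, hv]
  · have : p1.count v = 0 := List.count_eq_zero.mpr hv
    simp [PySem.Set.mem_ofList, hv, this]

lemma a_count (p1 p2 : List Int) (v : Int) :
    (and_posting p1 p2).count v = min (p1.count v) (p2.count v) := by
  unfold and_posting
  rw [mergeLoop_eq, List.nil_append,
    mergeInter_count _ _ (PySem.List.sorted_pairwise p1 (fun x => x))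
      (PySem.List.sorted_pairwise p2 (fun x => x)) v,
    (PySem.List.sorted_perm p1 (fun x => x) false).count_eq,
    (PySem.List.sorted_perm p2 (fun x => x) false).count_eq]

lemma a_pairwise (p1 p2 : List Int) : (and_posting p1 p2).Pairwise (· ≤ ·) := by
  unfold and_posting
  rw [mergeLoop_eq, List.nil_append]
  exact (PySem.List.sorted_pairwise p1 (fun x => x)).sublist (mergeInter_sublist _ _)

-- ===== VERDICT (by name: the statement is the Claim_ definition above) =====
theorem and_posting_spec : Claim_equal_and_posting := by
  intro p1 p2 _
  unfold Spec_and_posting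
  refine PySem.List.eq_of_perm_of_pairwise_le_of_injective (fun x => x)
    (fun _ _ h => h) ?_ (a_pairwise p1 p2) ?_
  · exact List.perm_iff_count.mpr fun v => by rw [a_count, alt_count]
  · exact PySem.List.sorted_pairwise _ (fun x => x)
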